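-- pv_equiv track=rewrite | github.com/schroderfernando16/TeoriaGrafosUFABC2023_3 | Grafos Ex/ep05.py | dfs_init
-- ===== SOURCE A (Python) =====
-- def dfs(graph, start_vertex, discovery, finalization, time, expression):
--     time[0] += 1
--     discovery[start_vertex] = time[0]
--     expression.append(f"({start_vertex}")
--     #usando de recursividade para implementação
--     for v in graph[start_vertex]:
--         if discovery[v] == -1:
--             dfs(graph, v, discovery, finalization, time, expression)
--
--     time[0] += 1
--     finalization[start_vertex] = time[0]
--     expression.append(f"{start_vertex})")
--
-- def dfs_init(n, graph):
--
--     discovery = [-1] * n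
--     finalization = [-1] * n
--     time = [0]
--     expression = []
--
--     for vertex in range(n):
--         if discovery[vertex] == -1:
--             dfs(graph, vertex, discovery, finalization, time, expression)
--
--     return ' '.join(expression)
-- ===== SOURCE B (Python) =====
-- def dfs_init(n, graph):
--     # Iterative DFS with an explicit stack of (vertex, remaining-neighbors) frames.
--     discovery = [-1] * n
--     finalization = [-1] * n
--     time = 0
--     expression = []
--
--     for vertex in range(n):
--         if discovery[vertex] != -1:
--             continue
--         time += 1
--         discovery[vertex] = time
--         expression.append(f"({vertex}")
--         stack = [(vertex, iter(graph[vertex]))]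
--         while stack:
--             u, it = stack[-1]
--             v = next(it, None)
--             if v is None:
--                 stack.pop()
--                 time += 1
--                 finalization[u] = time
--                 expression.append(f"{u})")
--             elif discovery[v] == -1:
--                 time += 1
--                 discovery[v] = time
--                 expression.append(f"({v}")
--                 stack.append((v, iter(graph[v])))
--
--     return ' '.join(expression)
-- ===== Notes on version B (the rewrite author's own statement) =====
-- stated objective: alternative
-- what changed: The recursive dfs helper is replaced by an iterative DFS driven by an explicit stack of (vertex, remaining-neighbours) frames, discovering a vertex when it is pushed and finalizing it when its frame is exhausted; same outer loop over range(n), same cost.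
-- outside the precondition, e.g. on dfs_init(2, [[-1], [0]]): A returns '(0 (-1 -1) 0)', B returns '(0 (-1 -1) 0)'
import Mathlib
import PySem

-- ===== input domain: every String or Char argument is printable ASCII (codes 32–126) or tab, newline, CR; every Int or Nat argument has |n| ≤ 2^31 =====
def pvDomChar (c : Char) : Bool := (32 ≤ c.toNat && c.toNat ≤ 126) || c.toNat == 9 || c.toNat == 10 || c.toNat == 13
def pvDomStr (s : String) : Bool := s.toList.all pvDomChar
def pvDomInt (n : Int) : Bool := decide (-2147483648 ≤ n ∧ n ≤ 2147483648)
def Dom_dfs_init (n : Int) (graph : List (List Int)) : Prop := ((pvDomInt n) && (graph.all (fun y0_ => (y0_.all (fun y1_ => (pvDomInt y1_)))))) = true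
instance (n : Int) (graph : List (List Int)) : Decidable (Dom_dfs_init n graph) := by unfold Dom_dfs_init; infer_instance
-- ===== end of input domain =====

-- B replaces A's recursive dfs helper by an iterative DFS over an explicit stack of
-- (vertex, remaining-neighbours) frames (objective: alternative decomposition, same cost).
-- Both ports thread the same 4-field state; the Lean ports use fuel only to be total
-- (the proofs show the fuel given is never exhausted on inputs satisfying Pre_).

structure DfsSt where
  d : List Int          -- discovery
  f : List Int          -- finalization
  t : Int               -- time[0]
  e : List String       -- expression
deriving Repr, DecidableEq

-- the three statements 'time+=1; discovery/finalization[u]=time; expression.append(...)'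
-- (identical lines in both Pythons)
def dfsEnter (u : Int) (s : DfsSt) : Option DfsSt :=
  match PySem.List.pySet? s.d u (s.t + 1) with
  | none => none
  | some d1 => some ⟨d1, s.f, s.t + 1, s.e ++ ["(" ++ PySem.Int.toStr u]⟩

def dfsFin (u : Int) (s : DfsSt) : Option DfsSt :=
  match PySem.List.pySet? s.f u (s.t + 1) with
  | none => none
  | some f1 => some ⟨s.d, f1, s.t + 1, s.e ++ [PySem.Int.toStr u ++ ")"]⟩

-- ===== PORT A =====
mutual
def dfsA (graph : List (List Int)) : Nat → Int → DfsSt → Option DfsSt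
  | 0, _, _ => none
  | fuel+1, u, s =>
    match dfsEnter u s with
    | none => none
    | some s1 =>
      match PySem.List.pyGet? graph u with
      | none => none
      | some adj =>
        match dfsLoopA graph fuel adj s1 with
        | none => none
        | some s2 => dfsFin u s2
termination_by fuel u s => (fuel, 0)

-- 'for v in L: if discovery[v] == -1: dfs(...)' — also the exact shape of A's outer loop
def dfsLoopA (graph : List (List Int)) : Nat → List Int → DfsSt → Option DfsSt
  | _, [], s => some s
  | fuel, v :: vs, s =>
    match PySem.List.pyGet? s.d v with
    | none => none
    | some dv =>
      if dv = -1 then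
        match dfsA graph fuel v s with
        | none => none
        | some s' => dfsLoopA graph fuel vs s'
      else dfsLoopA graph fuel vs s
termination_by fuel vs s => (fuel, vs.length + 1)
end

def dfs_init (n : Int) (graph : List (List Int)) : String :=
  let s0 : DfsSt := ⟨List.replicate n.toNat (-1), List.replicate n.toNat (-1), 0, []⟩
  match dfsLoopA graph (n.toNat + 1) (PySem.List.pyRange 0 n 1) s0 with
  | none => ""                                   -- unreachable under Pre_
  | some s => PySem.Str.join " " s.e

-- ===== PORT B =====
-- iterative DFS: stack of (vertex, remaining neighbours)
def runB (graph : List (List Int)) : Nat → List (Int × List Int) → DfsSt → Option DfsSt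
  | _, [], s => some s
  | 0, _ :: _, _ => none
  | fuel+1, (u, vs) :: rest, s =>
    match vs with
    | [] =>                                       -- iterator exhausted: pop and finalize
      match dfsFin u s with
      | none => none
      | some s' => runB graph fuel rest s'
    | v :: vs' =>
      match PySem.List.pyGet? s.d v with
      | none => none
      | some dv =>
        if dv = -1 then                           -- discover v and push its frame
          match dfsEnter v s with
          | none => none
          | some s1 =>
            match PySem.List.pyGet? graph v with
            | none => none
            | some adj => runB graph fuel ((v, adj) :: (u, vs') :: rest) s1
        else runB graph fuel ((u, vs') :: rest) s

def outerB (graph : List (List Int)) (fuel : Nat) : List Int → DfsSt → Option DfsSt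
  | [], s => some s
  | v :: vs, s =>
    match PySem.List.pyGet? s.d v with
    | none => none
    | some dv =>
      if dv = -1 then
        match dfsEnter v s with
        | none => none
        | some s1 =>
          match PySem.List.pyGet? graph v with
          | none => none
          | some adj =>
            match runB graph fuel [(v, adj)] s1 with
            | none => none
            | some s' => outerB graph fuel vs s'
      else outerB graph fuel vs s

def maxRow (graph : List (List Int)) : Nat := graph.foldl (fun m r => max m r.length) 0

def dfs_init_alt (n : Int) (graph : List (List Int)) : String :=
  let s0 : DfsSt := ⟨List.replicate n.toNat (-1), List.replicate n.toNat (-1), 0, []⟩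
  match outerB graph ((maxRow graph + 2) ^ (n.toNat + 1)) (PySem.List.pyRange 0 n 1) s0 with
  | none => ""                                   -- unreachable under Pre_
  | some s => PySem.Str.join " " s.e

-- ===== PRECONDITION & SPEC =====
-- Pre_ excludes the inputs where A raises IndexError (n exceeding len(graph), or a neighbour
-- outside [-n, n) in one of the first n rows), and for uniformity also negative in-range
-- neighbours, which A reads without raising only through accidental negative-index wraparound.
def Pre_dfs_init (n : Int) (graph : List (List Int)) : Prop :=
  n ≤ (graph.length : Int) ∧ ∀ adj ∈ graph.take n.toNat, ∀ v ∈ adj, 0 ≤ v ∧ v < n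
instance (n : Int) (graph : List (List Int)) : Decidable (Pre_dfs_init n graph) := by
  unfold Pre_dfs_init; infer_instance

def pvWitness_dfs_init : Int × List (List Int) := (3, [[1, 2], [2], [0]])

def Spec_dfs_init (n : Int) (graph : List (List Int)) (out : String) : Prop := out = dfs_init_alt n graph
instance (n : Int) (graph : List (List Int)) (out : String) : Decidable (Spec_dfs_init n graph out) := by unfold Spec_dfs_init; infer_instance

-- ===== CLAIM (what is proved, stated in full; the proofs are below) =====
def Claim_equal_dfs_init : Prop := ∀ (n : Int) (graph : List (List Int)), Dom_dfs_init n graph → Pre_dfs_init n graph → Spec_dfs_init n graph (dfs_init n graph)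

-- ===== LEMMAS AND PROOFS =====

def DfsInv (n : Int) (s : DfsSt) : Prop :=
  s.d.length = n.toNat ∧ s.f.length = n.toNat ∧ 0 ≤ s.t ∧ ∀ x ∈ s.d, x = -1 ∨ 0 < x

theorem foldl_max_bounds : ∀ (l : List (List Int)) (a : Nat),
    a ≤ l.foldl (fun m r => max m r.length) a ∧
    ∀ r ∈ l, r.length ≤ l.foldl (fun m r => max m r.length) a := by
  intro l
  induction l with
  | nil => intro a; simp
  | cons x l ih =>
    intro a
    simp only [List.foldl_cons, List.mem_cons]
    refine ⟨le_trans (le_max_left _ _) (ih _).1, ?_⟩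
    rintro r (rfl | hr)
    · exact le_trans (le_max_right _ _) (ih _).1
    · exact (ih _).2 r hr

theorem length_le_maxRow (graph : List (List Int)) (r : List Int) (hr : r ∈ graph) :
    r.length ≤ maxRow graph := (foldl_max_bounds graph 0).2 r hr

theorem runB_mono (graph : List (List Int)) (f k : Nat) (stack : List (Int × List Int))
    (s out : DfsSt) (h : runB graph f stack s = some out) :
    runB graph (f + k) stack s = some out := by
  induction f generalizing stack s with
  | zero =>
    cases stack with
    | nil => simpa [runB] using h
    | cons fr rest => simp [runB] at h
  | succ f ih =>
    cases stack with
    | nil => simpa [runB] using h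
    | cons fr rest =>
      obtain ⟨u, vs⟩ := fr
      have hk : f + 1 + k = (f + k) + 1 := by omega
      rw [hk]
      cases vs with
      | nil =>
        simp only [runB] at h ⊢
        cases hf : dfsFin u s with
        | none => rw [hf] at h; simp at h
        | some s' => rw [hf] at h; exact ih _ _ h
      | cons v vs' =>
        simp only [runB] at h ⊢
        cases hg : PySem.List.pyGet? s.d v with
        | none => rw [hg] at h; simp at h
        | some dv =>
          rw [hg] at h
          by_cases hdv : dv = -1
          · simp only [if_pos hdv] at h ⊢
            cases he : dfsEnter v s with
            | none => rw [he] at h; simp at h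
            | some s1 =>
              rw [he] at h
              cases ha : PySem.List.pyGet? graph v with
              | none => rw [ha] at h; simp at h
              | some adj => rw [ha] at h; exact ih _ _ h
          · simp only [if_neg hdv] at h ⊢
            exact ih _ _ h

theorem runB_sim (graph : List (List Int)) (M : Nat) (hM : ∀ r ∈ graph, r.length ≤ M) :
    ∀ (fA : Nat) (vs : List Int) (u : Int) (s : DfsSt) (rest : List (Int × List Int))
      (fB : Nat) (s2 s3 out : DfsSt),
      dfsLoopA graph fA vs s = some s2 → dfsFin u s2 = some s3 →
      runB graph fB rest s3 = some out →
      runB graph (fB + (vs.length + 1) * (M + 2) ^ fA) ((u, vs) :: rest) s = some out := by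
  intro fA
  induction fA using Nat.strong_induction_on with
  | _ fA IHfA =>
    intro vs
    induction vs with
    | nil =>
      intro u s rest fB s2 s3 out h1 h2 h3
      simp only [dfsLoopA, Option.some.injEq] at h1
      subst h1
      have hX : 0 < (M + 2) ^ fA := pow_pos (by omega) _
      obtain ⟨g, hg⟩ : ∃ g, fB + (0 + 1) * (M + 2) ^ fA = g + 1 :=
        ⟨fB + (0 + 1) * (M + 2) ^ fA - 1, by omega⟩
      rw [List.length_nil, hg]
      simp only [runB]
      rw [h2]
      have := runB_mono graph fB (g - fB) rest s3 out h3
      rwa [show fB + (g - fB) = g by omega] at this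
    | cons v vs' IHvs =>
      intro u s rest fB s2 s3 out h1 h2 h3
      have hX : 0 < (M + 2) ^ fA := pow_pos (by omega) _
      have h2X : (vs'.length + 1 + 1) * (M + 2) ^ fA
          = (vs'.length + 1) * (M + 2) ^ fA + (M + 2) ^ fA := by ring
      simp only [dfsLoopA] at h1
      split at h1
      · exact absurd h1 (by simp)
      · rename_i dv hgv
        split at h1
        · rename_i hdv
          split at h1
          · exact absurd h1 (by simp)
          · rename_i sAV hdfs
            cases fA with
            | zero => simp [dfsA] at hdfs
            | succ fA' =>
              simp only [dfsA] at hdfs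
              split at hdfs
              · exact absurd hdfs (by simp)
              · rename_i sE he
                split at hdfs
                · exact absurd hdfs (by simp)
                · rename_i adj ha
                  split at hdfs
                  · exact absurd hdfs (by simp)
                  · rename_i sL hl
                    have Hcont := IHvs u sAV rest fB s2 s3 out h1 h2 h3
                    have Hsub := IHfA fA' (Nat.lt_succ_self _) adj v sE ((u, vs') :: rest)
                      (fB + (vs'.length + 1) * (M + 2) ^ (fA' + 1)) sL sAV out hl hdfs Hcont
                    have hadj : adj.length ≤ M := hM adj (PySem.List.mem_of_pyGet?_eq_some graph ha)
                    have hZ : 0 < (M + 2) ^ fA' := pow_pos (by omega) _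
                    have hkey : (adj.length + 1) * (M + 2) ^ fA' + 1 ≤ (M + 2) ^ (fA' + 1) := by
                      have h1' : (adj.length + 1) * (M + 2) ^ fA' ≤ (M + 1) * (M + 2) ^ fA' :=
                        Nat.mul_le_mul_right _ (by omega)
                      have h2' : (M + 1) * (M + 2) ^ fA' + (M + 2) ^ fA' = (M + 2) ^ (fA' + 1) := by
                        rw [pow_succ]; ring
                      omega
                    rw [List.length_cons, h2X]
                    obtain ⟨g, hg⟩ : ∃ g, fB + ((vs'.length + 1) * (M + 2) ^ (fA' + 1)
                        + (M + 2) ^ (fA' + 1)) = g + 1 :=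
                      ⟨fB + ((vs'.length + 1) * (M + 2) ^ (fA' + 1)
                        + ((M + 2) ^ (fA' + 1) - 1)), by omega⟩
                    subst hdv
                    rw [hg]
                    simp only [runB, hgv, he, ha, reduceIte]
                    have := runB_mono graph
                      (fB + (vs'.length + 1) * (M + 2) ^ (fA' + 1) + (adj.length + 1) * (M + 2) ^ fA')
                      (g - (fB + (vs'.length + 1) * (M + 2) ^ (fA' + 1)
                        + (adj.length + 1) * (M + 2) ^ fA')) _ _ _ Hsub
                    rwa [show fB + (vs'.length + 1) * (M + 2) ^ (fA' + 1)
                        + (adj.length + 1) * (M + 2) ^ fA'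
                        + (g - (fB + (vs'.length + 1) * (M + 2) ^ (fA' + 1)
                        + (adj.length + 1) * (M + 2) ^ fA')) = g by omega] at this
        · rename_i hdv
          rw [List.length_cons, h2X]
          obtain ⟨g, hg⟩ : ∃ g, fB + ((vs'.length + 1) * (M + 2) ^ fA + (M + 2) ^ fA) = g + 1 :=
            ⟨fB + ((vs'.length + 1) * (M + 2) ^ fA + ((M + 2) ^ fA - 1)), by omega⟩
          rw [hg]
          simp only [runB, hgv, if_neg hdv]
          have := runB_mono graph (fB + (vs'.length + 1) * (M + 2) ^ fA)
            (g - (fB + (vs'.length + 1) * (M + 2) ^ fA)) _ _ _ (IHvs u s rest fB s2 s3 out h1 h2 h3)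
          rwa [show fB + (vs'.length + 1) * (M + 2) ^ fA
              + (g - (fB + (vs'.length + 1) * (M + 2) ^ fA)) = g by omega] at this

theorem count_neg_set (l : List Int) : ∀ (i : Nat), i < l.length → l[i]! = -1 → ∀ x : Int, x ≠ -1 →
    (l.set i x).count (-1) + 1 = l.count (-1) := by
  induction l with
  | nil => intro i hi; simp at hi
  | cons hd tl ih =>
    intro i hi hl x hx
    cases i with
    | zero =>
      simp at hl
      simp [List.set, hl, hx]
    | succ i =>
      simp only [List.length_cons, Nat.add_lt_add_iff_right] at hi
      simp only [List.getElem!_cons_succ] at hl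
      simp only [List.set, List.count_cons]
      have := ih i hi hl x hx
      omega

theorem dfsA_total (n : Int) (graph : List (List Int))
    (hG : n ≤ (graph.length : Int))
    (hA : ∀ adj ∈ graph.take n.toNat, ∀ v ∈ adj, 0 ≤ v ∧ v < n)
    (c : Nat) :
    ∀ (u : Int) (s : DfsSt), DfsInv n s → 0 ≤ u → u < n →
      PySem.List.pyGet? s.d u = some (-1) → s.d.count (-1) = c →
      ∀ fuel : Nat, c < fuel →
        ∃ s', dfsA graph fuel u s = some s' ∧ DfsInv n s' ∧ s'.d.count (-1) < c := by
  induction c using Nat.strong_induction_on with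
  | _ c IH =>
    intro u s hInv hu0 hun hget hcount fuel hfuel
    obtain ⟨hdlen, hflen, ht0, hdpos⟩ := hInv
    obtain ⟨k, rfl⟩ : ∃ m : Nat, u = (m : Int) := ⟨u.toNat, by omega⟩
    cases fuel with
    | zero => omega
    | succ fuel' =>
      have hk : k < s.d.length := by omega
      rw [PySem.List.pyGet?_natCast, List.getElem?_eq_getElem hk, Option.some.injEq] at hget
      -- discovery[u] := time+1
      have hE : dfsEnter (k : Int) s
          = some ⟨s.d.set k (s.t + 1), s.f, s.t + 1, s.e ++ ["(" ++ PySem.Int.toStr (k : Int)]⟩ := by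
        simp [dfsEnter, PySem.List.pySet?_natCast _ _ _ hk]
      have hkg : k < graph.length := by omega
      have hAdjGet : PySem.List.pyGet? graph (k : Int) = some graph[k] := by
        rw [PySem.List.pyGet?_natCast, List.getElem?_eq_getElem hkg]
      have hAdjMem : graph[k] ∈ graph.take n.toNat := by
        have hk' : k < (graph.take n.toNat).length := by
          simp only [List.length_take]; omega
        have : (graph.take n.toNat)[k] = graph[k] := List.getElem_take
        exact this ▸ (graph.take n.toNat).getElem_mem hk'
      have hcpos : 0 < c := by
        have : (-1 : Int) ∈ s.d := hget ▸ s.d.getElem_mem hk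
        have := List.count_pos_iff.mpr this
        omega
      have hcset : (s.d.set k (s.t + 1)).count (-1) + 1 = c := by
        rw [← hcount]
        exact count_neg_set s.d k hk (by simp [List.getElem!_eq_getElem?_getD,
          List.getElem?_eq_getElem hk, hget]) _ (by omega)
      -- the neighbour loop succeeds, by strong induction on the number of undiscovered vertices
      have TLoop : ∀ (vs : List Int), (∀ v ∈ vs, 0 ≤ v ∧ v < n) → ∀ s' : DfsSt, DfsInv n s' →
          s'.d.count (-1) < c →
          ∃ s2, dfsLoopA graph fuel' vs s' = some s2 ∧ DfsInv n s2 ∧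
            s2.d.count (-1) ≤ s'.d.count (-1) := by
        intro vs
        induction vs with
        | nil => intro _ s' h1 h2; exact ⟨s', by simp [dfsLoopA], h1, le_refl _⟩
        | cons v vs' ihv =>
          intro hvs s' hInv' hcnt
          obtain ⟨hd', hf', ht', hpos'⟩ := hInv'
          obtain ⟨hv0, hvn⟩ := hvs v (List.mem_cons_self ..)
          obtain ⟨kv, rfl⟩ : ∃ m : Nat, v = (m : Int) := ⟨v.toNat, by omega⟩
          have hkv : kv < s'.d.length := by omega
          have hgv : PySem.List.pyGet? s'.d (kv : Int) = some s'.d[kv] := by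
            rw [PySem.List.pyGet?_natCast, List.getElem?_eq_getElem hkv]
          by_cases hneg : s'.d[kv] = -1
          · have hrec := IH (s'.d.count (-1)) hcnt (kv : Int) s'
              ⟨hd', hf', ht', hpos'⟩ hv0 hvn (by rw [hgv, hneg]) rfl fuel' (by omega)
            obtain ⟨sm, hsm, hInvm, hcm⟩ := hrec
            obtain ⟨s2, h2a, h2b, h2c⟩ := ihv (fun w hw => hvs w (List.mem_cons_of_mem _ hw))
              sm hInvm (by omega)
            refine ⟨s2, ?_, h2b, by omega⟩
            simp only [dfsLoopA, hgv, hneg, if_pos, hsm]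
            exact h2a
          · obtain ⟨s2, h2a, h2b, h2c⟩ := ihv (fun w hw => hvs w (List.mem_cons_of_mem _ hw))
              s' ⟨hd', hf', ht', hpos'⟩ hcnt
            refine ⟨s2, ?_, h2b, h2c⟩
            simp only [dfsLoopA, hgv, if_neg hneg]
            exact h2a
      -- run the loop on graph[k] from the post-enter state
      have hInvE : DfsInv n ⟨s.d.set k (s.t + 1), s.f, s.t + 1,
          s.e ++ ["(" ++ PySem.Int.toStr (k : Int)]⟩ := by
        refine ⟨by simp [hdlen], hflen, by dsimp only; omega, ?_⟩
        intro x hx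
        rcases List.mem_or_eq_of_mem_set hx with h | h
        · exact hdpos x h
        · right; omega
      obtain ⟨s2, hL, hInv2, hc2⟩ := TLoop graph[k] (hA _ hAdjMem) _ hInvE (by show (s.d.set k (s.t + 1)).count (-1) < c; omega)
      obtain ⟨hd2, hf2, ht2, hpos2⟩ := hInv2
      have hkf : k < s2.f.length := by omega
      have hF : dfsFin (k : Int) s2
          = some ⟨s2.d, s2.f.set k (s2.t + 1), s2.t + 1, s2.e ++ [PySem.Int.toStr (k : Int) ++ ")"]⟩ := by
        simp [dfsFin, PySem.List.pySet?_natCast _ _ _ hkf]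
      have hc2' : s2.d.count (-1) ≤ (s.d.set k (s.t + 1)).count (-1) := hc2
      refine ⟨⟨s2.d, s2.f.set k (s2.t + 1), s2.t + 1, s2.e ++ [PySem.Int.toStr (k : Int) ++ ")"]⟩,
        ?_, ⟨hd2, by simp [hf2], by dsimp only; omega, hpos2⟩, ?_⟩
      · simp only [dfsA, hE, hAdjGet, hL, hF]
      · show s2.d.count (-1) < c
        omega

theorem outer_eq (n : Int) (graph : List (List Int))
    (hG : n ≤ (graph.length : Int))
    (hA : ∀ adj ∈ graph.take n.toNat, ∀ v ∈ adj, 0 ≤ v ∧ v < n) :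
    ∀ (verts : List Int) (s : DfsSt), (∀ v ∈ verts, 0 ≤ v ∧ v < n) → DfsInv n s →
      ∃ s', dfsLoopA graph (n.toNat + 1) verts s = some s' ∧
            outerB graph ((maxRow graph + 2) ^ (n.toNat + 1)) verts s = some s' ∧ DfsInv n s' := by
  intro verts
  induction verts with
  | nil => intro s _ hInv; exact ⟨s, by simp [dfsLoopA], by simp [outerB], hInv⟩
  | cons v vs ih =>
    intro s hvs hInv
    obtain ⟨hv0, hvn⟩ := hvs v (List.mem_cons_self ..)
    obtain ⟨k, rfl⟩ : ∃ m : Nat, v = (m : Int) := ⟨v.toNat, by omega⟩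
    obtain ⟨hdlen, hflen, ht0, hdpos⟩ := hInv
    have hk : k < s.d.length := by omega
    have hgv : PySem.List.pyGet? s.d (k : Int) = some s.d[k] := by
      rw [PySem.List.pyGet?_natCast, List.getElem?_eq_getElem hk]
    by_cases hneg : s.d[k] = -1
    · have hc : s.d.count (-1) < n.toNat + 1 := by
        have := List.count_le_length (l := s.d) (a := (-1 : Int))
        omega
      obtain ⟨sAV, hsA, hInvAV, _⟩ := dfsA_total n graph hG hA (s.d.count (-1)) (k : Int) s
        ⟨hdlen, hflen, ht0, hdpos⟩ hv0 hvn (by rw [hgv, hneg]) rfl (n.toNat + 1) hc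
      obtain ⟨s', ha', hb', hInv'⟩ := ih sAV (fun w hw => hvs w (List.mem_cons_of_mem _ hw)) hInvAV
      have hsA' := hsA
      simp only [dfsA] at hsA'
      split at hsA'
      · exact absurd hsA' (by simp)
      · rename_i sE he
        split at hsA'
        · exact absurd hsA' (by simp)
        · rename_i adj hadjg
          split at hsA'
          · exact absurd hsA' (by simp)
          · rename_i sL hl
            -- B runs the stack machine over the same subtree
            have hrun := runB_sim graph (maxRow graph)
              (fun r hr => length_le_maxRow graph r hr) n.toNat adj (k : Int) sE [] 0 sL sAV sAV
              hl hsA' rfl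
            have hadj : adj.length ≤ maxRow graph :=
              length_le_maxRow graph adj (PySem.List.mem_of_pyGet?_eq_some graph hadjg)
            have hle : 0 + (adj.length + 1) * (maxRow graph + 2) ^ n.toNat
                ≤ (maxRow graph + 2) ^ (n.toNat + 1) := by
              have h1 : (adj.length + 1) * (maxRow graph + 2) ^ n.toNat
                  ≤ (maxRow graph + 2) * (maxRow graph + 2) ^ n.toNat :=
                Nat.mul_le_mul_right _ (by omega)
              have h2 : (maxRow graph + 2) * (maxRow graph + 2) ^ n.toNat
                  = (maxRow graph + 2) ^ (n.toNat + 1) := by rw [pow_succ]; ring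
              omega
            have hrunFB := runB_mono graph _
              ((maxRow graph + 2) ^ (n.toNat + 1) - (0 + (adj.length + 1) * (maxRow graph + 2) ^ n.toNat))
              _ _ _ hrun
            rw [show 0 + (adj.length + 1) * (maxRow graph + 2) ^ n.toNat
                + ((maxRow graph + 2) ^ (n.toNat + 1)
                  - (0 + (adj.length + 1) * (maxRow graph + 2) ^ n.toNat))
                = (maxRow graph + 2) ^ (n.toNat + 1) by omega] at hrunFB
            refine ⟨s', ?_, ?_, hInv'⟩
            · simp only [dfsLoopA, hgv, hneg, if_pos, hsA]
              exact ha'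
            · simp only [outerB, hgv, hneg, if_pos, he, hadjg, hrunFB]
              exact hb'
    · obtain ⟨s', ha', hb', hInv'⟩ := ih s (fun w hw => hvs w (List.mem_cons_of_mem _ hw))
        ⟨hdlen, hflen, ht0, hdpos⟩
      refine ⟨s', ?_, ?_, hInv'⟩
      · simp only [dfsLoopA, hgv, if_neg hneg]
        exact ha'
      · simp only [outerB, hgv, if_neg hneg]
        exact hb'


-- ===== VERDICT (by name: the statement is the Claim_ definition above) =====
theorem dfs_init_spec : Claim_equal_dfs_init := by
  intro n graph _ hPre
  unfold Spec_dfs_init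
  obtain ⟨hG, hA⟩ := hPre
  have hInv0 : DfsInv n ⟨List.replicate n.toNat (-1), List.replicate n.toNat (-1), 0, []⟩ :=
    ⟨by simp, by simp, le_refl _, fun x hx => Or.inl (List.eq_of_mem_replicate hx)⟩
  have hverts : ∀ v ∈ PySem.List.pyRange 0 n 1, 0 ≤ v ∧ v < n := by
    intro v hv
    exact (PySem.List.mem_pyRange_one).mp hv
  obtain ⟨s', ha', hb', _⟩ := outer_eq n graph hG hA (PySem.List.pyRange 0 n 1) _ hverts hInv0
  simp only [dfs_init, dfs_init_alt, ha', hb']
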